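-- pv_equiv track=rewrite | github.com/acm-uga/archive | 2019-02-11/counting.py | base_count
-- ===== SOURCE A (Python) =====
-- def next_value(num, base):
--     '''Get the next number in the given base.
--
--     Arguments:
--         num (list of non-negative int):
--             The number in list form.
--         base (non-negative int):
--             The base of the number. Must be 2 or greater.
--
--     Returns:
--         The next number in list form. The number will have the same number of
--         digits. This function wraps around to 0 when it reaches the maximum
--         value for the given number of digits.
--     '''
--     num = num.copy()
--     max_digit = base - 1
--
--     if num == []:
--         return []
--
--     if num[-1] == max_digit:
--         num[:-1] = next_value(num[:-1], base)
--         num[-1] = 0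
--     else:
--         num[-1] = num[-1] + 1
--
--     return num
--
-- def base_count(base, digits):
--     '''Generate all numbers of a given base with some number of digits.
--
--     Arguments:
--         base (non-negative int):
--             The base of the number. Must be 2 or greater.
--         digits (non-negative int):
--             The number of digits.
--
--     Yields (list of non-negative int):
--         Yields each number as a list of ints in big-endian order.
--     '''
--     assert 2 <= base
--     assert 0 <= digits
--
--     max_digit = base - 1
--
--     start = [0 for _ in range(digits)]  # [0, 0, 0] when digits=3
--     stop = [max_digit for _ in range(digits)]  # [4, 4, 4] when digits=3 and base=5
--
--     val = start.copy()
--     while val < stop: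
--         yield val
--         val = next_value(val, base)
--     yield val
-- ===== SOURCE B (Python) =====
-- def base_count(base, digits):
--     '''Generate all numbers of a given base with some number of digits.
--
--     Recursive Cartesian-product enumeration (most-significant digit in the
--     outer loop) instead of iterating a successor function.
--     '''
--     assert 2 <= base
--     assert 0 <= digits
--
--     def suffixes(k):
--         if k == 0:
--             yield []
--         else:
--             for d in range(base):
--                 for rest in suffixes(k - 1):
--                     yield [d] + rest
--
--     yield from suffixes(digits)
-- ===== Notes on version B (the rewrite author's own statement) =====
-- stated objective: simpler
-- what changed: Replaces the recursive successor function and the while-loop with list comparison by a direct recursive Cartesian-product enumeration of the digit lists (outer loop over the leading digit, recursion on the remaining digit count).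
import Mathlib
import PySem

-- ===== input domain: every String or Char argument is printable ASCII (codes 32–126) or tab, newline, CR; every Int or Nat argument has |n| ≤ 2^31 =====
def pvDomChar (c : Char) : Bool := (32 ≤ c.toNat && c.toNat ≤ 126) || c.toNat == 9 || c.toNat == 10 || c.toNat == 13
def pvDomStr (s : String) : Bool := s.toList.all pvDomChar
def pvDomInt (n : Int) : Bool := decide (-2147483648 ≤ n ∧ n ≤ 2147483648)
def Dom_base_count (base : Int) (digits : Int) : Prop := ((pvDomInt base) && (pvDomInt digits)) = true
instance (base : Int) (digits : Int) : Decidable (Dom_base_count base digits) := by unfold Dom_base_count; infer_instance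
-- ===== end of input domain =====

-- ===== PORT A =====
-- B replaces A's successor-function iteration by a recursive Cartesian-product
-- enumeration; same yielded values in the same order (2 <= base, 0 <= digits).

-- Python list comparison `val < stop` (lexicographic, shorter prefix is smaller);
-- exact hand port (no PySem primitive for list `<`).
def pyListLt : List Int → List Int → Bool
  | _, [] => false
  | [], _ :: _ => true
  | a :: as, b :: bs => if a < b then true else if b < a then false else pyListLt as bs

-- port of A's next_value: num[:-1] = next_value(num[:-1]); num[-1] = 0 etc.
def next_value (num : List Int) (base : Int) : List Int :=
  if h : num = [] then []
  else if num.getLast h = base - 1 then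
    next_value num.dropLast base ++ [0]
  else
    num.dropLast ++ [num.getLast h + 1]
termination_by num.length
decreasing_by
  simp only [List.length_dropLast]
  cases num with
  | nil => exact absurd rfl h
  | cons a t => simp

-- A's while-loop; the fuel argument only makes the recursion structural and is
-- chosen large enough (base^digits) that it never runs out while `val < stop`.
def countAux (base : Int) (stop : List Int) : Nat → List Int → List (List Int)
  | 0, val => [val]
  | fuel + 1, val =>
    if pyListLt val stop then val :: countAux base stop fuel (next_value val base)
    else [val]

def base_count (base : Int) (digits : Int) : List (List Int) :=
  let stop := List.replicate digits.toNat (base - 1)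
  countAux base stop (base.toNat ^ digits.toNat) (List.replicate digits.toNat 0)

-- ===== PORT B =====
-- port of Source B's recursive generator `suffixes` (list of everything yielded)
def suffixes (base : Int) : Nat → List (List Int)
  | 0 => [[]]
  | k + 1 => (List.range base.toNat).flatMap
      (fun d : Nat => (suffixes base k).map (fun rest => (d : Int) :: rest))

def base_count_alt (base : Int) (digits : Int) : List (List Int) :=
  suffixes base digits.toNat

-- ===== PRECONDITION & SPEC =====
-- A's asserts: AssertionError unless 2 <= base and 0 <= digits.
def Pre_base_count (base : Int) (digits : Int) : Prop := 2 ≤ base ∧ 0 ≤ digits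
instance (base : Int) (digits : Int) : Decidable (Pre_base_count base digits) := by
  unfold Pre_base_count; infer_instance

def pvWitness_base_count : Int × Int := (2, 2)

def Spec_base_count (base : Int) (digits : Int) (out : List (List Int)) : Prop := out = base_count_alt base digits
instance (base : Int) (digits : Int) (out : List (List Int)) : Decidable (Spec_base_count base digits out) := by unfold Spec_base_count; infer_instance

-- ===== CLAIM (what is proved, stated in full; the proofs are below) =====
def Claim_equal_base_count : Prop := ∀ (base : Int) (digits : Int), Dom_base_count base digits → Pre_base_count base digits → Spec_base_count base digits (base_count base digits)

-- ===== LEMMAS AND PROOFS =====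

lemma pyListLt_irrefl (x : List Int) : pyListLt x x = false := by
  induction x with
  | nil => rfl
  | cons a t ih => simp [pyListLt, ih]

lemma head?_suffixes (base : Int) (n : Nat) (hb : 2 ≤ base) :
    (suffixes base n).head? = some (List.replicate n 0) := by
  induction n with
  | zero => rfl
  | succ k ih =>
    obtain ⟨m, hm⟩ : ∃ m, base.toNat = m + 1 := ⟨base.toNat - 1, by omega⟩
    simp only [suffixes, hm, List.range_succ_eq_map, List.flatMap_cons, List.head?_append,
      List.head?_map, ih]
    rfl

lemma getLast?_suffixes (base : Int) (n : Nat) (hb : 2 ≤ base) :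
    (suffixes base n).getLast? = some (List.replicate n (base - 1)) := by
  induction n with
  | zero => rfl
  | succ k ih =>
    obtain ⟨m, hm⟩ : ∃ m, base.toNat = m + 1 := ⟨base.toNat - 1, by omega⟩
    have hmv : (m : Int) = base - 1 := by omega
    simp only [suffixes, hm, List.range_succ, List.flatMap_append, List.flatMap_cons,
      List.flatMap_nil, List.append_nil, List.getLast?_append, List.getLast?_map, ih]
    simp [hmv, List.replicate_succ]

lemma mem_lt_suffixes (base : Int) (n : Nat) (hb : 2 ≤ base) (x : List Int)
    (hx : x ∈ suffixes base n) (hne : x ≠ List.replicate n (base - 1)) :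
    pyListLt x (List.replicate n (base - 1)) = true := by
  induction n generalizing x with
  | zero =>
    simp [suffixes] at hx
    exact absurd (by simp [hx]) hne
  | succ k ih =>
    simp only [suffixes, List.mem_flatMap, List.mem_map, List.mem_range] at hx
    obtain ⟨d, hd, t, ht, rfl⟩ := hx
    have hdlt : (d : Int) < base := by omega
    rw [List.replicate_succ]
    by_cases hcase : (d : Int) < base - 1
    · simp [pyListLt, hcase]
    · have hdeq : (d : Int) = base - 1 := by omega
      have htne : t ≠ List.replicate k (base - 1) := by
        intro h; exact hne (by rw [List.replicate_succ, hdeq, h])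
      simp [pyListLt, hdeq, ih t ht htne]

lemma getLast_eq_of_concat {l m : List Int} {a : Int} (h : l ≠ []) (he : l = m ++ [a]) :
    l.getLast h = a := by subst he; exact List.getLast_concat

lemma next_value_cons (base : Int) (d : Int) (x : List Int)
    (hx : x ≠ List.replicate x.length (base - 1)) :
    next_value (d :: x) base = d :: next_value x base := by
  induction x using List.reverseRecOn generalizing d with
  | nil => exact absurd rfl hx
  | append_singleton xs a ih =>
    have hne : d :: (xs ++ [a]) ≠ [] := by simp
    have hne2 : xs ++ [a] ≠ [] := by simp
    have hlast : (d :: (xs ++ [a])).getLast hne = a := getLast_eq_of_concat hne (m := d :: xs) rfl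
    have hlast2 : (xs ++ [a]).getLast hne2 = a := getLast_eq_of_concat hne2 rfl
    have hdrop : (d :: (xs ++ [a])).dropLast = d :: xs := by
      simpa using List.dropLast_concat (l₁ := d :: xs) (b := a)
    by_cases ha : a = base - 1
    · have hxs : xs ≠ List.replicate xs.length (base - 1) := by
        intro h
        apply hx
        have hlen : (xs ++ [a]).length = xs.length + 1 := by simp
        rw [hlen, List.replicate_succ', ← h, ha]
      have hR : next_value (xs ++ [a]) base = next_value xs base ++ [0] := by
        rw [next_value, dif_neg hne2, if_pos (by rw [hlast2]; exact ha), List.dropLast_concat]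
      have hL : next_value (d :: (xs ++ [a])) base = next_value (d :: xs) base ++ [0] := by
        rw [next_value, dif_neg hne, if_pos (by rw [hlast]; exact ha), hdrop]
      rw [hL, hR, ih _ hxs]
      simp
    · have hR : next_value (xs ++ [a]) base = xs ++ [a + 1] := by
        rw [next_value, dif_neg hne2, if_neg (by rw [hlast2]; exact ha), List.dropLast_concat,
          hlast2]
      have hL : next_value (d :: (xs ++ [a])) base = (d :: xs) ++ [a + 1] := by
        rw [next_value, dif_neg hne, if_neg (by rw [hlast]; exact ha), hdrop, hlast]
      rw [hL, hR]
      simp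

lemma next_value_rep (base : Int) (d : Int) (n : Nat) (hd : d ≠ base - 1) :
    next_value (d :: List.replicate n (base - 1)) base = (d + 1) :: List.replicate n 0 := by
  induction n with
  | zero =>
    rw [next_value, dif_neg (by simp)]
    simp [hd]
  | succ k ih =>
    have hne : d :: List.replicate (k + 1) (base - 1) ≠ [] := by simp
    have hsh : d :: List.replicate (k + 1) (base - 1)
        = (d :: List.replicate k (base - 1)) ++ [base - 1] := by
      simp [List.replicate_succ']
    have hdrop : (d :: List.replicate (k + 1) (base - 1)).dropLast
        = d :: List.replicate k (base - 1) := by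
      rw [hsh, List.dropLast_concat]
    rw [next_value, dif_neg hne, if_pos (getLast_eq_of_concat hne hsh), hdrop, ih]
    simp [List.replicate_succ']

-- every non-final element of the enumeration has length n, is not the maximum,
-- and is mapped to its successor element by next_value
lemma chain_suffixes (base : Int) (n : Nat) (hb : 2 ≤ base) :
    List.IsChain (fun x y => x.length = n ∧ x ≠ List.replicate n (base - 1)
      ∧ next_value x base = y) (suffixes base n) := by
  induction n with
  | zero => simp [suffixes]
  | succ k ih =>
    -- chain within one block of leading digit d (d ≤ base - 1 arbitrary here)
    have hblock : ∀ d : Nat, (d : Int) ≤ base - 1 →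
        List.IsChain (fun x y => x.length = k + 1 ∧ x ≠ List.replicate (k + 1) (base - 1)
          ∧ next_value x base = y)
          ((suffixes base k).map (fun rest => ((d : Nat) : Int) :: rest)) := by
      intro d hd
      rw [List.isChain_map]
      refine ih.imp ?_
      rintro t1 t2 ⟨hlen, hne, hnv⟩
      refine ⟨by simp [hlen], ?_, ?_⟩
      · intro h
        rw [List.replicate_succ] at h
        simp only [List.cons.injEq] at h
        exact hne h.2
      · rw [next_value_cons base _ t1 (by rw [hlen]; exact hne), hnv]
    -- chain over the concatenation of the first m blocks, m ≤ base
    have haux : ∀ m : Nat, m ≤ base.toNat →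
        List.IsChain (fun x y => x.length = k + 1 ∧ x ≠ List.replicate (k + 1) (base - 1)
          ∧ next_value x base = y)
          ((List.range m).flatMap (fun d => (suffixes base k).map (fun rest => ((d : Nat) : Int) :: rest))) := by
      intro m
      induction m with
      | zero => intro _; simp
      | succ j ihm =>
        intro hj
        rw [List.range_succ, List.flatMap_append, List.flatMap_cons, List.flatMap_nil,
          List.append_nil, List.isChain_append]
        refine ⟨ihm (by omega), hblock j (by omega), ?_⟩
        intro x hx y hy
        -- boundary: x is the last element of the first j blocks, y the head of block j
        rcases Nat.eq_zero_or_pos j with hj0 | hj0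
        · subst hj0; simp at hx
        · obtain ⟨i, hi⟩ : ∃ i, j = i + 1 := ⟨j - 1, by omega⟩
          subst hi
          -- last of first (i+1) blocks is ↑i :: replicate k (base-1)
          have hlx : x = (i : Int) :: List.replicate k (base - 1) := by
            rw [List.range_succ, List.flatMap_append, List.flatMap_cons, List.flatMap_nil,
              List.append_nil, List.getLast?_append, List.getLast?_map,
              getLast?_suffixes base k hb] at hx
            simpa using hx.symm
          have hhy : y = ((i + 1 : Nat) : Int) :: List.replicate k 0 := by
            rw [List.head?_map, head?_suffixes base k hb] at hy
            simpa using hy.symm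
          have hine : (i : Int) ≠ base - 1 := by omega
          subst hlx; subst hhy
          refine ⟨by simp, ?_, ?_⟩
          · intro h
            rw [List.replicate_succ] at h
            injection h with h1 _
            exact hine h1
          · rw [next_value_rep base _ k hine]
            simp
    exact haux base.toNat le_rfl

lemma countAux_suffix (base : Int) (n : Nat) (hb : 2 ≤ base) :
    ∀ (l : List (List Int)) (val : List Int) (fuel : Nat),
      (val :: l) <:+ suffixes base n → l.length ≤ fuel →
      countAux base (List.replicate n (base - 1)) fuel val = val :: l := by
  intro l
  induction l with
  | nil =>
    intro val fuel hsuf _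
    obtain ⟨pre, hpre⟩ := hsuf
    have : (suffixes base n).getLast? = some val := by
      rw [← hpre, List.getLast?_concat]
    rw [getLast?_suffixes base n hb] at this
    have hv : val = List.replicate n (base - 1) := by injection this with h; exact h.symm
    subst hv
    cases fuel with
    | zero => rfl
    | succ f => simp [countAux, pyListLt_irrefl]
  | cons v2 l' ihl =>
    intro val fuel hsuf hfuel
    have hchain := (chain_suffixes base n hb).suffix hsuf
    rw [List.isChain_cons_cons] at hchain
    obtain ⟨⟨_, hne, hnv⟩, _⟩ := hchain
    have hmem : val ∈ suffixes base n := hsuf.subset (List.mem_cons_self ..)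
    have hlt := mem_lt_suffixes base n hb val hmem hne
    obtain ⟨f, rfl⟩ : ∃ f, fuel = f + 1 := ⟨fuel - 1, by simp at hfuel; omega⟩
    rw [countAux, if_pos hlt, hnv]
    congr 1
    refine ihl v2 f ?_ (by simp at hfuel; omega)
    exact (List.suffix_cons val (v2 :: l')).trans hsuf

lemma length_suffixes (base : Int) (n : Nat) :
    (suffixes base n).length = base.toNat ^ n := by
  induction n with
  | zero => rfl
  | succ k ih =>
    simp only [suffixes, List.length_flatMap, List.length_map, ih, List.map_const',
      List.length_range, List.sum_replicate, smul_eq_mul]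
    ring

-- ===== VERDICT (by name: the statement is the Claim_ definition above) =====
theorem base_count_spec : Claim_equal_base_count := by
  intro base digits _ hpre
  obtain ⟨hb, hd⟩ := hpre
  unfold Spec_base_count base_count base_count_alt
  have hh := head?_suffixes base digits.toNat hb
  obtain ⟨tl, htl⟩ : ∃ tl, suffixes base digits.toNat = List.replicate digits.toNat 0 :: tl := by
    cases hc : suffixes base digits.toNat with
    | nil => rw [hc] at hh; simp at hh
    | cons a t => rw [hc] at hh; simp at hh; exact ⟨t, by rw [hh]⟩
  have hlen : tl.length ≤ base.toNat ^ digits.toNat := by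
    have := length_suffixes base digits.toNat
    rw [htl] at this
    simp at this
    omega
  rw [countAux_suffix base digits.toNat hb tl (List.replicate digits.toNat 0)
    (base.toNat ^ digits.toNat) (htl ▸ List.suffix_refl _) hlen, htl]
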